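-- pv_equiv track=rewrite | github.com/stanislavmarochok/Sbox-Tool | analyzers/DifferenceDistributionTable.py | difference_distribution_table
-- ===== SOURCE A (Python) =====
-- def difference_distribution_table(sbox):
--     sbox_length = len(sbox)
--     ddt = [[0] * sbox_length for _ in range(sbox_length)]
--
--     for i, x in enumerate(sbox):
--         for j, y in enumerate(sbox):
--             xor_in = i ^ j
--             xor_out = x ^ y
--             ddt[xor_in][xor_out] += 1
--
--     return ddt
-- ===== SOURCE B (Python) =====
-- def difference_distribution_table(sbox):
--     n = len(sbox)
--     ddt = []
--     for delta in range(n):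
--         if delta == 0:
--             # the diagonal pairs (x, x) all land on ddt[0][0]
--             row = [n] + [0] * (n - 1)
--         else:
--             # DDT symmetry: (x, x^delta) and (x^delta, x) hit the same cell,
--             # so visit each unordered pair once and add 2
--             row = [0] * n
--             for x in range(n):
--                 partner = x ^ delta
--                 if x < partner:
--                     row[sbox[x] ^ sbox[partner]] += 2
--         ddt.append(row)
--     return ddt
-- ===== Notes on version B (the rewrite author's own statement) =====
-- stated objective: alternative
-- what changed: B exploits the DDT symmetry (x,y)<->(y,x): it emits row 0 in closed form as [n,0,...,0] and fills each other row delta by visiting each unordered pair {x, x^delta} once (only x < x^delta) and adding 2, instead of A's scatter of +1 over all n^2 ordered pairs.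
import Mathlib
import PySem

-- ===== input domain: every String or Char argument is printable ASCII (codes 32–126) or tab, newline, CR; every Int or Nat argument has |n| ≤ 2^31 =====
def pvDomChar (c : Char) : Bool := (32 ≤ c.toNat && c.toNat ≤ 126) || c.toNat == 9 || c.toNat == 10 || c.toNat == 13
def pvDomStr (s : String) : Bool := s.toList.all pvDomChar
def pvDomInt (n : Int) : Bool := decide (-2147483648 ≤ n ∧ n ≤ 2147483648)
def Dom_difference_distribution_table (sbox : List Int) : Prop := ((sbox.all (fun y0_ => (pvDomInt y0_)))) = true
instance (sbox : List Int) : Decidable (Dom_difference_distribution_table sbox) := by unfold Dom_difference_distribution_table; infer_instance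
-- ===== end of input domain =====

-- B exploits the DDT symmetry (x,y) ↔ (y,x): row 0 is emitted in closed form as
-- [n,0,…,0] and every other row delta is filled by visiting each unordered pair
-- {x, x^delta} once (only x < x^delta) adding 2, instead of A's scatter of +1 over
-- all n² ordered pairs. Equality proved on Pre_ (exactly the inputs where A returns).

-- shared Python-semantics helpers (used by both ports and by Pre_):
-- Python's '^' on arbitrary ints (two's complement); exact, by case on the signs.
def pyXor (a b : Int) : Int :=
  if 0 ≤ a then
    if 0 ≤ b then ((a.toNat ^^^ b.toNat : Nat) : Int)
    else -(((a.toNat ^^^ (-(b + 1)).toNat : Nat) : Int)) - 1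
  else
    if 0 ≤ b then -((((-(a + 1)).toNat ^^^ b.toNat : Nat) : Int)) - 1
    else (((-(a + 1)).toNat ^^^ (-(b + 1)).toNat : Nat) : Int)

-- Python's l[i] = f(l[i]) with negative-index wraparound; out-of-range (IndexError in
-- Python) is excluded by Pre_, where this helper is a no-op.
def wrapIdx (len : Nat) (i : Int) : Nat := if i < 0 then (i + len).toNat else i.toNat
def pyModify (l : List Int) (i : Int) (f : Int → Int) : List Int := l.modify (wrapIdx l.length i) f
def pyModifyT (l : List (List Int)) (i : Int) (f : List Int → List Int) : List (List Int) :=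
  l.modify (wrapIdx l.length i) f

-- ===== PORT A =====
def difference_distribution_table (sbox : List Int) : List (List Int) :=
  let sboxLength := sbox.length
  let ddt := List.replicate sboxLength (List.replicate sboxLength (0 : Int))
  (PySem.List.enumerate sbox).foldl (fun ddt ix =>
    (PySem.List.enumerate sbox).foldl (fun ddt jy =>
      let xorIn := pyXor ix.1 jy.1
      let xorOut := pyXor ix.2 jy.2
      pyModifyT ddt xorIn (fun row => pyModify row xorOut (· + 1))) ddt) ddt

-- ===== PORT B =====
-- Source B step for step: 'for delta in range(n)' is a fold over List.range n appending one
-- row; row 0 is the literal [n] + [0]*(n-1); otherwise 'for x in range(n)' increments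
-- row[sbox[x] ^ sbox[partner]] by 2 only when x < partner (= x ^ delta).
def difference_distribution_table_alt (sbox : List Int) : List (List Int) :=
  let n := sbox.length
  (List.range n).foldl (fun ddt delta =>
    ddt ++ [if delta = 0 then
        ((n : Int) :: List.replicate (n - 1) (0 : Int))
      else
        (List.range n).foldl (fun row x =>
          let partner := x ^^^ delta
          if x < partner then
            pyModify row (pyXor (sbox.getD x 0) (sbox.getD partner 0)) (· + 2)
          else row) (List.replicate n (0 : Int))]) []

-- ===== PRECONDITION & SPEC =====
-- Pre_ is exactly the inputs on which A returns (no IndexError): every position XOR i^j is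
-- below the length (i.e. the length is 0 or a power of two), and every entry XOR lands in
-- [-n, n) (Python resolves negative column indices by wraparound; beyond that it raises).
def Pre_difference_distribution_table (sbox : List Int) : Prop :=
  (∀ i < sbox.length, ∀ j < sbox.length, i ^^^ j < sbox.length) ∧
  (∀ x ∈ sbox, ∀ y ∈ sbox,
    -(sbox.length : Int) ≤ pyXor x y ∧ pyXor x y < (sbox.length : Int))
instance (sbox : List Int) : Decidable (Pre_difference_distribution_table sbox) := by
  unfold Pre_difference_distribution_table; infer_instance

def pvWitness_difference_distribution_table : List Int := [2, 3, 0, 1]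

def Spec_difference_distribution_table (sbox : List Int) (out : List (List Int)) : Prop := out = difference_distribution_table_alt sbox
instance (sbox : List Int) (out : List (List Int)) : Decidable (Spec_difference_distribution_table sbox out) := by unfold Spec_difference_distribution_table; infer_instance

-- ===== CLAIM (what is proved, stated in full; the proofs are below) =====
def Claim_equal_difference_distribution_table : Prop := ∀ (sbox : List Int), Dom_difference_distribution_table sbox → Pre_difference_distribution_table sbox → Spec_difference_distribution_table sbox (difference_distribution_table sbox)

-- ===== LEMMAS AND PROOFS =====

theorem pyXor_natCast (i j : Nat) : pyXor (i : Int) (j : Int) = ((i ^^^ j : Nat) : Int) := by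
  simp [pyXor]

theorem pyXor_comm (a b : Int) : pyXor a b = pyXor b a := by
  unfold pyXor
  by_cases ha : 0 ≤ a <;> by_cases hb : 0 ≤ b <;> simp [ha, hb, Nat.xor_comm]

theorem pyXor_self (a : Int) : pyXor a a = 0 := by
  unfold pyXor
  by_cases ha : 0 ≤ a <;> simp [ha]

theorem pyModifyT_natCast (t : List (List Int)) (i j : Nat) (f : List Int → List Int) :
    pyModifyT t ((i ^^^ j : Nat) : Int) f = t.modify (i ^^^ j) f := by
  simp only [pyModifyT, wrapIdx]
  rw [if_neg (Int.not_lt.mpr (Int.natCast_nonneg _))]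
  simp

-- bridge: a fold over enumerate is a fold over range (indices used as the Ints they are)
theorem foldl_enumerate_int {β : Type} (l : List Int) (f : β → Int → Int → β) (s : Nat) (init : β) :
    (PySem.List.enumerate l (s : Int)).foldl (fun b p => f b p.1 p.2) init
      = (List.range l.length).foldl (fun b i => f b ((s + i : Nat) : Int) (l.getD i 0)) init := by
  induction l generalizing s init with
  | nil => simp [PySem.List.enumerate]
  | cons x xs ih =>
    rw [PySem.List.enumerate_cons]
    simp only [List.foldl_cons, List.length_cons, List.range_succ_eq_map, List.foldl_map,
      Nat.succ_eq_add_one, Nat.add_zero, List.getD_cons_zero, List.getD_cons_succ]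
    have hcast : (s : Int) + 1 = ((s + 1 : Nat) : Int) := by push_cast; ring
    rw [hcast, ih (s + 1) (f init (s : Int) x)]
    apply PySem.List.foldl_congr_mem
    intro b i _
    have h2 : s + 1 + i = s + (i + 1) := by omega
    rw [h2]

theorem foldl_enumerate_int0 {β : Type} (l : List Int) (f : β → Int → Int → β) (init : β) :
    (PySem.List.enumerate l).foldl (fun b p => f b p.1 p.2) init
      = (List.range l.length).foldl (fun (b : β) (i : Nat) => f b (i : Int) (l.getD i 0)) init := by
  have h := foldl_enumerate_int l f 0 init
  simpa using h

theorem length_foldl_modify (ps : List (Nat × Int)) (t : List (List Int)) :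
    (ps.foldl (fun t p => t.modify p.1 (fun row => pyModify row p.2 (· + 1))) t).length
      = t.length := by
  induction ps generalizing t with
  | nil => rfl
  | cons p ps ih => simp [List.foldl_cons, ih, List.length_modify]

-- scatter: row d of the pair-scatter fold is a column fold over the pairs targeting row d
theorem getElem_foldl_modify (ps : List (Nat × Int)) (t : List (List Int)) (d : Nat)
    (hd : d < t.length) :
    (ps.foldl (fun t p => t.modify p.1 (fun row => pyModify row p.2 (· + 1))) t)[d]'(by
        rw [length_foldl_modify]; exact hd)
      = (ps.filterMap (fun p => if p.1 = d then some p.2 else none)).foldl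
          (fun row c => pyModify row c (· + 1)) (t[d]'hd) := by
  induction ps generalizing t with
  | nil => rfl
  | cons p ps ih =>
    simp only [List.foldl_cons, List.filterMap_cons]
    rw [ih (t.modify p.1 (fun row => pyModify row p.2 (· + 1))) (by rw [List.length_modify]; exact hd)]
    by_cases h : p.1 = d
    · subst h
      simp
    · simp [h]

-- a filterMap over range with a unique hit
theorem filterMap_range_single {γ : Type} (n t : Nat) (h : Nat → γ) (ht : t < n) :
    (List.range n).filterMap (fun j => if j = t then some (h j) else none) = [h t] := by
  induction n with
  | zero => omega
  | succ m ih =>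
    rw [List.range_succ, List.filterMap_append]
    by_cases hm : t = m
    · subst hm
      have : (List.range t).filterMap (fun j => if j = t then some (h j) else none) = [] := by
        apply List.filterMap_eq_nil_iff.mpr
        intro j hj
        have := List.mem_range.mp hj
        simp only [ite_eq_right_iff]
        intro hjt; omega
      simp [this]
    · have ht' : t < m := by omega
      rw [ih ht']
      have hmt : m ≠ t := by omega
      simp [hmt]

theorem flatMap_singleton_eq_map {α γ : Type} (l : List α) (f : α → γ) :
    l.flatMap (fun x => [f x]) = l.map f := by
  induction l with
  | nil => rfl
  | cons x xs ih => simp [List.flatMap_cons, ih]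

-- A's fold rewritten as one scatter fold over the flattened pair list
theorem A_as_scatter (sbox : List Int) :
    difference_distribution_table sbox
      = (((List.range sbox.length).flatMap (fun i => (List.range sbox.length).map (fun j =>
            (i ^^^ j, pyXor (sbox.getD i 0) (sbox.getD j 0))))).foldl
          (fun t p => t.modify p.1 (fun row => pyModify row p.2 (· + 1)))
          (List.replicate sbox.length (List.replicate sbox.length (0 : Int)))) := by
  calc difference_distribution_table sbox
      = (List.range sbox.length).foldl (fun (b : List (List Int)) (i : Nat) =>
          (PySem.List.enumerate sbox).foldl (fun b' jy =>
            pyModifyT b' (pyXor (i : Int) jy.1)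
              (fun row => pyModify row (pyXor (sbox.getD i 0) jy.2) (· + 1))) b)
          (List.replicate sbox.length (List.replicate sbox.length (0 : Int))) :=
        foldl_enumerate_int0 (β := List (List Int)) sbox
          (fun b i x =>
            (PySem.List.enumerate sbox).foldl (fun (b' : List (List Int)) (jy : Int × Int) =>
              pyModifyT b' (pyXor i jy.1)
                (fun row => pyModify row (pyXor x jy.2) (· + 1))) b) _
    _ = (List.range sbox.length).foldl (fun b i =>
          (List.range sbox.length).foldl (fun b' j =>
            b'.modify (i ^^^ j)
              (fun row => pyModify row (pyXor (sbox.getD i 0) (sbox.getD j 0)) (· + 1))) b)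
          (List.replicate sbox.length (List.replicate sbox.length (0 : Int))) := by
        apply PySem.List.foldl_congr_mem
        intro b i _
        rw [foldl_enumerate_int0 (β := List (List Int)) sbox
          (fun (b' : List (List Int)) (j : Int) (y : Int) =>
            pyModifyT b' (pyXor (i : Int) j)
              (fun row => pyModify row (pyXor (sbox.getD i 0) y) (· + 1))) b]
        apply PySem.List.foldl_congr_mem
        intro b' j _
        rw [pyXor_natCast, pyModifyT_natCast]
    _ = _ := by
        rw [List.foldl_flatMap]
        apply PySem.List.foldl_congr_mem
        intro b i _
        rw [List.foldl_map]

-- A's row d, under the in-range hypothesis, is a +1 column fold over the row's column list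
theorem A_row (sbox : List Int)
    (h1 : ∀ i < sbox.length, ∀ j < sbox.length, i ^^^ j < sbox.length)
    (d : Nat) (hdn : d < sbox.length) :
    (difference_distribution_table sbox)[d]'(by
        rw [A_as_scatter, length_foldl_modify]; simpa using hdn)
      = ((List.range sbox.length).map (fun i =>
            pyXor (sbox.getD i 0) (sbox.getD (i ^^^ d) 0))).foldl
          (fun row c => pyModify row c (· + 1)) (List.replicate sbox.length (0 : Int)) := by
  have hA := A_as_scatter sbox
  rw [List.getElem_of_eq hA]
  rw [getElem_foldl_modify _ _ d (by simpa using hdn)]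
  rw [List.getElem_replicate]
  congr 1
  rw [List.filterMap_flatMap]
  have hstep : ∀ i ∈ List.range sbox.length,
      ((List.range sbox.length).map (fun j =>
          (i ^^^ j, pyXor (sbox.getD i 0) (sbox.getD j 0)))).filterMap
        (fun p => if p.1 = d then some p.2 else none)
      = [pyXor (sbox.getD i 0) (sbox.getD (i ^^^ d) 0)] := by
    intro i hi
    have hin : i < sbox.length := List.mem_range.mp hi
    rw [List.filterMap_map]
    have hfn : ((fun p : Nat × Int => if p.1 = d then some p.2 else none) ∘
        (fun j => (i ^^^ j, pyXor (sbox.getD i 0) (sbox.getD j 0))))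
      = (fun j => if j = i ^^^ d then
          some (pyXor (sbox.getD i 0) (sbox.getD j 0)) else none) := by
      funext j
      by_cases hj : j = i ^^^ d
      · subst hj; simp
      · have : i ^^^ j ≠ d := by
          intro hc
          apply hj
          have : i ^^^ (i ^^^ j) = i ^^^ d := by rw [hc]
          simpa using this
        simp [this, hj]
    rw [hfn, filterMap_range_single sbox.length (i ^^^ d)
      (fun j => pyXor (sbox.getD i 0) (sbox.getD j 0)) (h1 i hin d hdn)]
  rw [List.flatMap_congr hstep]
  rw [flatMap_singleton_eq_map]

-- B's fold rewritten as a map over the row index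
theorem B_as_map (sbox : List Int) :
    difference_distribution_table_alt sbox
      = (List.range sbox.length).map (fun d =>
          if d = 0 then ((sbox.length : Int) :: List.replicate (sbox.length - 1) (0 : Int))
          else (List.range sbox.length).foldl (fun row x =>
              if x < x ^^^ d then
                pyModify row (pyXor (sbox.getD x 0) (sbox.getD (x ^^^ d) 0)) (· + 2)
              else row) (List.replicate sbox.length (0 : Int))) := by
  show (List.range sbox.length).foldl (fun ddt delta => ddt ++ [_]) [] = _
  rw [PySem.List.foldl_append_singleton_eq_map]
  simp

-- one-dimensional scatter characterisations ------------------------------------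

theorem length_foldl_pyModify1 (cs : List Int) (r : List Int) :
    (cs.foldl (fun r c => pyModify r c (· + 1)) r).length = r.length := by
  induction cs generalizing r with
  | nil => rfl
  | cons c cs ih =>
    rw [List.foldl_cons, ih]
    simp [pyModify, List.length_modify]

theorem getElem_foldl_pyModify1 (cs : List Int) (r : List Int) (k : Nat) (hk : k < r.length) :
    (cs.foldl (fun r c => pyModify r c (· + 1)) r)[k]'(by rw [length_foldl_pyModify1]; exact hk)
      = r[k]'hk + ((cs.countP (fun c => wrapIdx r.length c == k) : Nat) : Int) := by
  induction cs generalizing r with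
  | nil => simp
  | cons c cs ih =>
    simp only [List.foldl_cons, List.countP_cons]
    have hlen : (pyModify r c (· + 1)).length = r.length := by
      simp [pyModify, List.length_modify]
    have := ih (pyModify r c (· + 1)) (by rw [hlen]; exact hk)
    simp only [hlen] at this
    rw [this]
    have hget : (pyModify r c (· + 1))[k]'(by rw [hlen]; exact hk)
        = if wrapIdx r.length c = k then r[k]'hk + 1 else r[k]'hk := by
      simp [pyModify, List.getElem_modify, eq_comm]
    rw [hget]
    by_cases h : wrapIdx r.length c = k <;> simp [h] <;> ring

theorem length_foldl_pair (d : Nat) (g : Nat → Int) (xs : List Nat) (r : List Int) :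
    (xs.foldl (fun row x => if x < x ^^^ d then pyModify row (g x) (· + 2) else row) r).length
      = r.length := by
  induction xs generalizing r with
  | nil => rfl
  | cons x xs ih =>
    rw [List.foldl_cons, ih]
    by_cases h : x < x ^^^ d <;> simp [h, pyModify, List.length_modify]

theorem getElem_foldl_pair (d : Nat) (g : Nat → Int) (xs : List Nat) (r : List Int)
    (k : Nat) (hk : k < r.length) :
    (xs.foldl (fun row x => if x < x ^^^ d then pyModify row (g x) (· + 2) else row) r)[k]'(by
        rw [length_foldl_pair]; exact hk)
      = r[k]'hk + 2 * ((xs.countP (fun x => x < x ^^^ d && wrapIdx r.length (g x) == k) : Nat) : Int) := by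
  induction xs generalizing r with
  | nil => simp
  | cons x xs ih =>
    simp only [List.foldl_cons, List.countP_cons]
    by_cases hx : x < x ^^^ d
    · have hlen : (pyModify r (g x) (· + 2)).length = r.length := by
        simp [pyModify, List.length_modify]
      simp only [if_pos hx]
      have := ih (pyModify r (g x) (· + 2)) (by rw [hlen]; exact hk)
      simp only [hlen] at this
      rw [this]
      have hget : (pyModify r (g x) (· + 2))[k]'(by rw [hlen]; exact hk)
          = if wrapIdx r.length (g x) = k then r[k]'hk + 2 else r[k]'hk := by
        simp [pyModify, List.getElem_modify, eq_comm]
      rw [hget]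
      by_cases h : wrapIdx r.length (g x) = k <;> simp [h, hx] <;> ring
    · simp only [if_neg hx]
      rw [ih r hk]
      simp [hx]

-- counting over range as a Finset card
theorem countP_range_eq_card (n : Nat) (p : Nat → Bool) :
    (List.range n).countP p = ((Finset.range n).filter (fun x => p x = true)).card := by
  induction n with
  | zero => simp
  | succ m ih =>
    rw [List.range_succ, List.countP_append, Finset.range_add_one, Finset.filter_insert]
    by_cases hp : p m = true
    · rw [if_pos hp, Finset.card_insert_of_notMem (by simp)]
      simp [hp, ih]
    · rw [if_neg hp]
      simp [hp, ih]

-- the symmetry count: each unordered pair {x, x^d} contributes twice, once from each side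
theorem count_pair_split (n d k : Nat) (hd : d ≠ 0) (g : Nat → Int)
    (hg : ∀ x, g (x ^^^ d) = g x)
    (hcl : ∀ x < n, x ^^^ d < n) :
    (List.range n).countP (fun x => wrapIdx n (g x) == k)
      = 2 * (List.range n).countP (fun x => x < x ^^^ d && wrapIdx n (g x) == k) := by
  rw [countP_range_eq_card, countP_range_eq_card]
  have hne : ∀ x : Nat, x ^^^ d ≠ x := by
    intro x hx
    apply hd
    have : x ^^^ (x ^^^ d) = x ^^^ x := by rw [hx]
    simpa using this
  -- split the full filter by x < x ^^^ d
  have hsplit := Finset.card_filter_add_card_filter_not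
    (s := (Finset.range n).filter (fun x => (wrapIdx n (g x) == k) = true))
    (p := fun x => x < x ^^^ d)
  -- the "x > x ^^^ d" half has the same card via the involution x ↦ x ^^^ d
  have hbij : (((Finset.range n).filter (fun x => (wrapIdx n (g x) == k) = true)).filter
        (fun x => ¬ x < x ^^^ d)).card
      = (((Finset.range n).filter (fun x => (wrapIdx n (g x) == k) = true)).filter
        (fun x => x < x ^^^ d)).card := by
    apply Finset.card_bij' (i := fun x _ => x ^^^ d) (j := fun x _ => x ^^^ d)
    · intro x hx
      simp only [Finset.mem_filter, Finset.mem_range] at hx ⊢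
      obtain ⟨⟨hxn, hwk⟩, hnlt⟩ := hx
      refine ⟨⟨hcl x hxn, ?_⟩, ?_⟩
      · rw [hg]; exact hwk
      · have : x ^^^ d ^^^ d = x := by simp
        rw [this]
        rcases Nat.lt_or_ge x (x ^^^ d) with h | h
        · exact absurd h hnlt
        · exact lt_of_le_of_ne h (hne x)
    · intro x hx
      simp only [Finset.mem_filter, Finset.mem_range] at hx ⊢
      obtain ⟨⟨hxn, hwk⟩, hlt⟩ := hx
      refine ⟨⟨hcl x hxn, ?_⟩, ?_⟩
      · rw [hg]; exact hwk
      · have hxx : x ^^^ d ^^^ d = x := by simp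
        rw [hxx]
        omega
    · intro x _; simp
    · intro x _; simp
  have hcong : ((Finset.range n).filter (fun x => (x < x ^^^ d && wrapIdx n (g x) == k) = true))
      = (((Finset.range n).filter (fun x => (wrapIdx n (g x) == k) = true)).filter
        (fun x => x < x ^^^ d)) := by
    rw [Finset.filter_filter]
    apply Finset.filter_congr
    intro x _
    simp [and_comm]
  rw [hcong]
  omega

-- ===== VERDICT (by name: the statement is the Claim_ definition above) =====
theorem difference_distribution_table_spec : Claim_equal_difference_distribution_table := by
  intro sbox _ hpre
  obtain ⟨h1, -⟩ := hpre
  unfold Spec_difference_distribution_table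
  rw [B_as_map]
  apply List.ext_getElem
  · rw [A_as_scatter, length_foldl_modify]; simp
  · intro d hdA hdB
    have hdn : d < sbox.length := by
      rw [A_as_scatter, length_foldl_modify] at hdA; simpa using hdA
    rw [List.getElem_map, List.getElem_range]
    rw [A_row sbox h1 d hdn]
    by_cases hd0 : d = 0
    · subst hd0
      -- row 0: every column value is pyXor v v = 0
      have hmap : (List.range sbox.length).map (fun i =>
            pyXor (sbox.getD i 0) (sbox.getD (i ^^^ 0) 0))
          = (List.range sbox.length).map (fun _ => (0 : Int)) := by
        apply List.map_congr_left
        intro i _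
        simp [pyXor_self]
      rw [hmap, if_pos rfl]
      apply List.ext_getElem
      · rw [length_foldl_pyModify1]
        simp only [List.length_replicate, List.length_cons]
        omega
      · intro k hkA hkB
        have hkn : k < sbox.length := by
          rw [length_foldl_pyModify1] at hkA; simpa using hkA
        rw [getElem_foldl_pyModify1 _ _ k (by simpa using hkn)]
        rw [List.getElem_replicate]
        have hn1 : 1 ≤ sbox.length := by omega
        have hw0 : wrapIdx (List.replicate sbox.length (0 : Int)).length (0 : Int) = 0 := by
          simp [wrapIdx]
        by_cases hk0 : k = 0
        · subst hk0
          rw [List.countP_map]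
          have : ((fun c => wrapIdx (List.replicate sbox.length (0 : Int)).length c == 0) ∘
              (fun _ : Nat => (0 : Int))) = fun _ : Nat => true := by
            funext x; simp [wrapIdx]
          rw [this]
          simp
        · rw [List.countP_map]
          have : ((fun c => wrapIdx (List.replicate sbox.length (0 : Int)).length c == k) ∘
              (fun _ : Nat => (0 : Int))) = fun _ : Nat => false := by
            funext x
            simp [wrapIdx, Ne.symm hk0]
          rw [this]
          rcases Nat.exists_eq_add_of_le hn1 with ⟨m, hm⟩
          have hk' : k - 1 < sbox.length - 1 := by
            simp only [List.length_cons, List.length_replicate] at hkB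
            omega
          have : ((sbox.length : Int) :: List.replicate (sbox.length - 1) (0 : Int))[k]'hkB
              = (List.replicate (sbox.length - 1) (0 : Int))[k - 1]'(by simpa using hk') := by
            rcases k with _ | k'
            · exact absurd rfl hk0
            · simp
          rw [this, List.getElem_replicate]
          simp
    · rw [if_neg hd0]
      apply List.ext_getElem
      · rw [length_foldl_pyModify1, length_foldl_pair]
      · intro k hkA hkB
        have hkn : k < sbox.length := by
          rw [length_foldl_pyModify1] at hkA; simpa using hkA
        rw [getElem_foldl_pyModify1 _ _ k (by simpa using hkn)]
        rw [getElem_foldl_pair _ _ _ _ k (by simpa using hkn)]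
        rw [List.getElem_replicate, List.countP_map]
        simp only [List.length_replicate]
        have hg : ∀ x : Nat, pyXor (sbox.getD (x ^^^ d) 0) (sbox.getD ((x ^^^ d) ^^^ d) 0)
            = pyXor (sbox.getD x 0) (sbox.getD (x ^^^ d) 0) := by
          intro x
          have : x ^^^ d ^^^ d = x := by simp
          rw [this, pyXor_comm]
        have hcount := count_pair_split sbox.length d k hd0
          (fun x => pyXor (sbox.getD x 0) (sbox.getD (x ^^^ d) 0)) hg
          (fun x hx => h1 x hx d hdn)
        have hcomp : ((fun c => wrapIdx sbox.length c == k) ∘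
            (fun i => pyXor (sbox.getD i 0) (sbox.getD (i ^^^ d) 0)))
            = fun x => wrapIdx sbox.length (pyXor (sbox.getD x 0) (sbox.getD (x ^^^ d) 0)) == k := by
          funext x; rfl
        rw [hcomp, hcount]
        push_cast
        ring
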